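-- pv_equiv track=rewrite | github.com/Peter2510/XSQL | Backend/Main.py | comprobarTexto
-- ===== SOURCE A (Python) =====
-- def comprobarTexto(entrada):
--     result = ""
--     enComillas = False
--
--     for char in entrada:
--         if char == '"' or char == "'":
--             enComillas = not enComillas
--         result += char.lower() if not enComillas else char
--     return result
-- ===== SOURCE B (Python) =====
-- import re
--
-- def comprobarTexto(entrada):
--     # split into alternating text chunks and quote delimiters; lowercase a text
--     # chunk only when an even number of quote delimiters precede it
--     parts = re.split(r'("|\')', entrada)
--     out = []
--     quotes_seen = 0
--     for p in parts:
--         if p == '"' or p == "'":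
--             out.append(p)
--             quotes_seen += 1
--         elif quotes_seen % 2 == 0:
--             out.append(p.lower())
--         else:
--             out.append(p)
--     return ''.join(out)
-- ===== Notes on version B (the rewrite author's own statement) =====
-- stated objective: faster
-- what changed: Replaces A's per-character quote-toggle loop (building the result one char at a time with +=) by a regex split into alternating quote-free text chunks and quote delimiters, lowercasing whole chunks by the parity of delimiters seen and joining once.
import Mathlib
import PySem

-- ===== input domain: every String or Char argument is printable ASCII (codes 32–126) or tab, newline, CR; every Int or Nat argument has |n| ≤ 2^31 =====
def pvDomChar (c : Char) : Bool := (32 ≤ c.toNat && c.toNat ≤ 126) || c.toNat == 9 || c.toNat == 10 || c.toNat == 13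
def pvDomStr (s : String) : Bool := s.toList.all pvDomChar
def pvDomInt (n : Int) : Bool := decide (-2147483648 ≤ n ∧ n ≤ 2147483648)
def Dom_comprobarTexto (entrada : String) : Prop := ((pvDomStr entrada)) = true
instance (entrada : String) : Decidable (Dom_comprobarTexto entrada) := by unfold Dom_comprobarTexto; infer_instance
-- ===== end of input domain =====

-- B replaces A's char-by-char quote-toggle loop by a regex-style split into text chunks and
-- quote delimiters, lowercasing whole chunks by parity of the delimiters seen (objective: faster, measured).

-- ===== PORT A =====
-- step of A's for-loop: toggle enComillas on a quote, then append char.lower() or char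
def aStep (st : List Char × Bool) (c : Char) : List Char × Bool :=
  let en := if c == '"' || c == '\'' then !st.2 else st.2
  (st.1 ++ [if !en then PySem.Chars.lowerChar c else c], en)

def comprobarTexto (entrada : String) : String :=
  let st := entrada.toList.foldl aStep ([], false)
  String.ofList st.1

-- ===== PORT B =====
-- hand port of re.split(r'("|\')', entrada): exact for this pattern — alternating
-- (possibly empty) quote-free text chunks and single-character quote delimiters
def splitQ : List Char → List (List Char)
  | [] => [[]]
  | c :: cs =>
    if c == '"' || c == '\'' then [] :: [c] :: splitQ cs
    else
      match splitQ cs with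
      | p :: ps => (c :: p) :: ps
      | [] => [[c]]

-- step of B's for-loop over the split parts
def bStep (st : List (List Char) × Int) (p : List Char) : List (List Char) × Int :=
  if p == ['"'] || p == ['\''] then (st.1 ++ [p], st.2 + 1)
  else if PySem.Int.mod st.2 2 == 0 then (st.1 ++ [PySem.Chars.lower p], st.2)
  else (st.1 ++ [p], st.2)

def comprobarTexto_alt (entrada : String) : String :=
  let st := (splitQ entrada.toList).foldl bStep ([], 0)
  String.ofList st.1.flatten

-- ===== PRECONDITION & SPEC =====
def Spec_comprobarTexto (entrada : String) (out : String) : Prop := out = comprobarTexto_alt entrada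
instance (entrada : String) (out : String) : Decidable (Spec_comprobarTexto entrada out) := by unfold Spec_comprobarTexto; infer_instance

-- ===== CLAIM (what is proved, stated in full; the proofs are below) =====
def Claim_equal_comprobarTexto : Prop := ∀ (entrada : String), Dom_comprobarTexto entrada → Spec_comprobarTexto entrada (comprobarTexto entrada)

-- ===== LEMMAS AND PROOFS =====

/-- common recursive characterisation of the result: lowercase outside quotes. -/
def qspec : List Char → Bool → List Char
  | [], _ => []
  | c :: cs, en =>
    if c == '"' || c == '\'' then c :: qspec cs (!en)
    else (if en then c else PySem.Chars.lowerChar c) :: qspec cs en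

theorem aFold_eq (cs : List Char) : ∀ (acc : List Char) (en : Bool),
    (cs.foldl aStep (acc, en)).1 = acc ++ qspec cs en := by
  induction cs with
  | nil => intro acc en; simp [qspec]
  | cons c cs ih =>
    intro acc en
    by_cases hq : (c == '"' || c == '\'') = true
    · have hc : c = '"' ∨ c = '\'' := by
        rcases Bool.or_eq_true_iff.mp hq with h | h
        · exact Or.inl (by exact_mod_cast of_decide_eq_true h)
        · exact Or.inr (by exact_mod_cast of_decide_eq_true h)
      have hl : PySem.Chars.lowerChar c = c := by
        rcases hc with rfl | rfl <;> decide
      simp only [List.foldl_cons, aStep, hq, if_true, qspec]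
      rw [ih]
      cases en <;> simp [hl]
    · simp only [Bool.not_eq_true] at hq
      simp only [List.foldl_cons, aStep, hq, Bool.false_eq_true, if_false, qspec]
      rw [ih]
      cases en <;> simp

theorem bFold_acc (ps : List (List Char)) : ∀ (acc : List (List Char)) (q : Int),
    ps.foldl bStep (acc, q) =
      (acc ++ (ps.foldl bStep ([], q)).1, (ps.foldl bStep ([], q)).2) := by
  induction ps with
  | nil => intro acc q; simp
  | cons p ps ih =>
    intro acc q
    simp only [List.foldl_cons, bStep, List.nil_append]
    split_ifs with h1 h2
    · rw [ih (acc ++ [p]) (q + 1), ih [p] (q + 1)]; simp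
    · rw [ih (acc ++ [PySem.Chars.lower p]) q, ih [PySem.Chars.lower p] q]; simp
    · rw [ih (acc ++ [p]) q, ih [p] q]; simp

/-- splitQ always returns a nonempty list whose head chunk contains no quote characters. -/
theorem splitQ_shape (cs : List Char) :
    ∃ p ps, splitQ cs = p :: ps ∧ ∀ x ∈ p, (x == '"' || x == '\'') = false := by
  induction cs with
  | nil => exact ⟨[], [], rfl, by simp⟩
  | cons c cs ih =>
    by_cases hq : (c == '"' || c == '\'') = true
    · exact ⟨[], [c] :: splitQ cs, by simp [splitQ, hq], by simp⟩
    · rcases ih with ⟨p, ps, hsp, hfree⟩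
      refine ⟨c :: p, ps, by simp [splitQ, hq, hsp], ?_⟩
      intro x hx
      rcases List.mem_cons.mp hx with rfl | hx
      · simpa using hq
      · exact hfree x hx

theorem chunk_not_delim {p : List Char} (hfree : ∀ x ∈ p, (x == '"' || x == '\'') = false) :
    (p == ['"'] || p == ['\'']) = false := by
  cases p with
  | nil => decide
  | cons x xs =>
    have := hfree x (List.mem_cons_self)
    rcases Bool.or_eq_false_iff.mp this with ⟨h1, h2⟩
    simp [List.cons_beq_cons, h1, h2]

theorem bFold_splitQ (cs : List Char) : ∀ (q : Int),
    ((splitQ cs).foldl bStep ([], q)).1.flatten =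
      qspec cs (decide (PySem.Int.mod q 2 = 1)) := by
  have hmod : ∀ q : Int, PySem.Int.mod q 2 = q % 2 :=
    fun q => PySem.Int.mod_eq_emod_of_pos (by norm_num)
  induction cs with
  | nil =>
    intro q
    simp [splitQ, bStep, PySem.Chars.lower, qspec]
  | cons c cs ih =>
    intro q
    by_cases hq : (c == '"' || c == '\'') = true
    · have hc : c = '"' ∨ c = '\'' := by
        rcases Bool.or_eq_true_iff.mp hq with h | h
        · exact Or.inl (by exact_mod_cast of_decide_eq_true h)
        · exact Or.inr (by exact_mod_cast of_decide_eq_true h)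
      simp only [splitQ, hq, if_true, List.foldl_cons]
      have hempty : bStep ([], q) [] = ([[]], q) := by
        simp [bStep, PySem.Chars.lower]
      have hdstep : bStep ([[]], q) [c] = ([[], [c]], q + 1) := by
        rcases hc with rfl | rfl <;> simp [bStep]
      rw [hempty, hdstep, bFold_acc]
      simp only [List.flatten_cons, List.nil_append, List.cons_append]
      rw [ih (q + 1)]
      have hpar : (decide (PySem.Int.mod (q + 1) 2 = 1)) = !(decide (PySem.Int.mod q 2 = 1)) := by
        rw [hmod, hmod]
        rcases Int.emod_two_eq q with h | h <;>
          · have h' : (q + 1) % 2 = 1 - q % 2 := by omega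
            simp [h, h']
      rw [hpar]
      simp [qspec, hq]
    · rcases splitQ_shape cs with ⟨p, ps, hsp, hfree⟩
      have hnd : ¬((p == ['"'] || p == ['\'']) = true) := by
        intro h; rw [chunk_not_delim hfree] at h; exact Bool.false_ne_true h
      have hnd' : ¬((c :: p == ['"'] || c :: p == ['\'']) = true) := by
        have : ∀ x ∈ c :: p, (x == '"' || x == '\'') = false := by
          intro x hx
          rcases List.mem_cons.mp hx with rfl | hx
          · simpa using hq
          · exact hfree x hx
        intro h; rw [chunk_not_delim this] at h; exact Bool.false_ne_true h
      have hsplit : splitQ (c :: cs) = (c :: p) :: ps := by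
        simp [splitQ, hq, hsp]
      have ihcs := ih q
      rw [hsp] at ihcs
      rw [hsplit]
      simp only [List.foldl_cons, bStep] at ihcs ⊢
      rw [if_neg hnd] at ihcs
      rw [if_neg hnd']
      by_cases hm : (PySem.Int.mod q 2 == 0) = true
      · have h0 : PySem.Int.mod q 2 = 0 := by simpa using hm
        have hen : decide (PySem.Int.mod q 2 = 1) = false := by rw [h0]; decide
        rw [if_pos hm] at ihcs
        rw [if_pos hm, bFold_acc]
        rw [bFold_acc] at ihcs
        simp only [List.nil_append, List.flatten_cons,
          PySem.Chars.lower, List.map_cons, List.cons_append] at ihcs ⊢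
        rw [ihcs, hen]
        simp [qspec, hq]
      · have hne : ¬ PySem.Int.mod q 2 = 0 := by simpa using hm
        have h1 : PySem.Int.mod q 2 = 1 := by
          rw [hmod] at hne ⊢; omega
        have hen : decide (PySem.Int.mod q 2 = 1) = true := by rw [h1]; decide
        rw [if_neg hm] at ihcs
        rw [if_neg hm, bFold_acc]
        rw [bFold_acc] at ihcs
        simp only [List.nil_append, List.flatten_cons, List.cons_append] at ihcs ⊢
        rw [ihcs, hen]
        simp [qspec, hq]

-- ===== VERDICT (by name: the statement is the Claim_ definition above) =====
theorem comprobarTexto_spec : Claim_equal_comprobarTexto := by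
  intro entrada _
  unfold Spec_comprobarTexto comprobarTexto comprobarTexto_alt
  simp only []
  rw [aFold_eq entrada.toList [] false, bFold_splitQ entrada.toList 0]
  norm_num
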